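-- pv_equiv track=rewrite | github.com/sneefyyy/DSL | generators/count_and_transform_generator.py | mark_by_frequency
-- ===== SOURCE A (Python) =====
-- def mark_by_frequency(grid):
--     """
--     Mark the most frequent color with 1, all others with 0.
--     """
--     if not grid or not grid[0]:
--         return grid
--
--     rows = len(grid)
--     cols = len(grid[0])
--
--     # Count color frequencies
--     counts = {}
--     for row in range(rows):
--         for col in range(cols):
--             if grid[row][col] != 0:
--                 counts[grid[row][col]] = counts.get(grid[row][col], 0) + 1
--
--     if not counts:
--         return [[0] * cols for _ in range(rows)]
--
--     # Find most frequent color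
--     most_frequent = max(counts, key=counts.get)
--
--     # Create output marking most frequent color
--     output = [[0] * cols for _ in range(rows)]
--     for row in range(rows):
--         for col in range(cols):
--             if grid[row][col] == most_frequent:
--                 output[row][col] = 1
--
--     return output
-- ===== SOURCE B (Python) =====
-- def mark_by_frequency(grid):
--     """
--     Mark the most frequent color with 1, all others with 0.
--     """
--     if not grid or not grid[0]:
--         return grid
--
--     rows, cols = len(grid), len(grid[0])
--
--     # Group the coordinates of every nonzero color in one scan
--     positions = {}
--     for r in range(rows):
--         for c in range(cols):
--             v = grid[r][c]
--             if v != 0: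
--                 positions.setdefault(v, []).append((r, c))
--
--     output = [[0] * cols for _ in range(rows)]
--     if positions:
--         winner = max(positions, key=lambda color: len(positions[color]))
--         for r, c in positions[winner]:
--             output[r][c] = 1
--     return output
-- ===== Notes on version B (the rewrite author's own statement) =====
-- stated objective: alternative
-- what changed: Instead of A's color->count dict followed by a second full-grid scan comparing every cell with the winner, B builds a color->coordinate-list dict in one scan, picks the winner as the color with the longest list (max over insertion order keeps A's tie-break), and writes 1 only at the winner's stored coordinates into the zero grid, so the second phase touches only the winning cells.
import Mathlib
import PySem

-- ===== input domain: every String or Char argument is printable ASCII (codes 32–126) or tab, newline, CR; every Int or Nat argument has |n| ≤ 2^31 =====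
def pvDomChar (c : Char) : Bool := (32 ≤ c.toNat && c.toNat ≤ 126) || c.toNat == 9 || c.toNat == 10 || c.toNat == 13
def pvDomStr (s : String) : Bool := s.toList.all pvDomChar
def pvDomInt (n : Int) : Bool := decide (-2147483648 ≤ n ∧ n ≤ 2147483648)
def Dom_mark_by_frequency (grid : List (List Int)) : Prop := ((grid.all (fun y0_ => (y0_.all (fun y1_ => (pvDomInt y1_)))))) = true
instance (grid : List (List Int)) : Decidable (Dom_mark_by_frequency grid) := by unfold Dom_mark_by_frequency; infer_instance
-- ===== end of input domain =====

-- B replaces A's frequency dict and second full-grid comparison scan by a dict of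
-- coordinate lists: one scan groups the positions of every nonzero color, the winner
-- is the color with the longest list, and only its positions are written into the
-- zero grid (objective: alternative).

-- ===== PORT A =====
-- the 'counts' dict built by A's double index loop
def pvCountsA (grid : List (List Int)) (rows cols : Nat) : PySem.Dict Int Int :=
  (List.range rows).foldl (fun d row =>
    (List.range cols).foldl (fun d col =>
      if (grid.getD row []).getD col 0 ≠ 0 then
        d.insert ((grid.getD row []).getD col 0) (d.getD ((grid.getD row []).getD col 0) 0 + 1)
      else d) d) PySem.Dict.empty

-- '[[0] * cols for _ in range(rows)]'
def pvZeroGrid (rows cols : Nat) : List (List Int) :=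
  (List.range rows).map (fun _ => List.replicate cols 0)

-- 'max(counts, key=counts.get)'; counts.get k is ported as getD k 0: the key is only
-- applied to keys of counts, where Python's counts.get returns exactly that int
def pvMostFrequentA (counts : PySem.Dict Int Int) : Int :=
  (PySem.List.max? counts.keys (fun k => counts.getD k 0)).getD 0

-- the second double index loop: 'output[row][col] = 1' on the zero grid
def pvMarkA (grid : List (List Int)) (mf : Int) (rows cols : Nat) : List (List Int) :=
  (List.range rows).foldl (fun out row =>
    (List.range cols).foldl (fun out col =>
      if (grid.getD row []).getD col 0 = mf then out.set row ((out.getD row []).set col 1)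
      else out) out) (pvZeroGrid rows cols)

def mark_by_frequency (grid : List (List Int)) : List (List Int) :=
  if grid = [] ∨ grid.headD [] = [] then grid
  else if pvCountsA grid grid.length (grid.headD []).length = PySem.Dict.empty then
    pvZeroGrid grid.length (grid.headD []).length
  else
    pvMarkA grid (pvMostFrequentA (pvCountsA grid grid.length (grid.headD []).length))
      grid.length (grid.headD []).length

-- ===== PORT B =====
-- 'positions.setdefault(v, []).append((r, c))' over the index-scanned grid
def pvPositionsB (grid : List (List Int)) (rows cols : Nat) : PySem.Dict Int (List (Int × Int)) :=
  (List.range rows).foldl (fun d r =>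
    (List.range cols).foldl (fun d c =>
      if (grid.getD r []).getD c 0 ≠ 0 then
        d.modify ((grid.getD r []).getD c 0) [] (· ++ [(((r : Nat) : Int), ((c : Nat) : Int))])
      else d) d) PySem.Dict.empty

-- 'max(positions, key=lambda color: len(positions[color]))'; positions[color] is
-- only read at keys of positions, where getD returns exactly that list
def pvWinnerB (positions : PySem.Dict Int (List (Int × Int))) : Int :=
  (PySem.List.max? positions.keys
    (fun color => ((positions.getD color []).length : Int))).getD 0

def mark_by_frequency_alt (grid : List (List Int)) : List (List Int) :=
  if grid = [] ∨ grid.headD [] = [] then grid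
  else
    let positions := pvPositionsB grid grid.length (grid.headD []).length
    let output := (List.range grid.length).map (fun _ => List.replicate (grid.headD []).length 0)
    if positions = PySem.Dict.empty then output
    else
      -- the coordinates produced by the scan are nonnegative, so .toNat is exact
      (positions.getD (pvWinnerB positions) []).foldl
        (fun out rc => out.set rc.1.toNat ((out.getD rc.1.toNat []).set rc.2.toNat 1)) output

-- ===== PRECONDITION & SPEC =====
-- Pre_ excludes only the grids on which both Pythons raise IndexError: some row
-- shorter than the first (both read grid[r][c] for every c < len(grid[0])).
def Pre_mark_by_frequency (grid : List (List Int)) : Prop :=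
  ∀ row ∈ grid, (grid.headD []).length ≤ row.length
instance (grid : List (List Int)) : Decidable (Pre_mark_by_frequency grid) := by
  unfold Pre_mark_by_frequency; infer_instance
def pvWitness_mark_by_frequency : List (List Int) := [[1, 2], [2, 0]]

def Spec_mark_by_frequency (grid : List (List Int)) (out : List (List Int)) : Prop :=
  out = mark_by_frequency_alt grid
instance (grid : List (List Int)) (out : List (List Int)) : Decidable (Spec_mark_by_frequency grid out) := by
  unfold Spec_mark_by_frequency; infer_instance

-- ===== CLAIM (what is proved, stated in full; the proofs are below) =====
def Claim_equal_mark_by_frequency : Prop := ∀ (grid : List (List Int)), Dom_mark_by_frequency grid → Pre_mark_by_frequency grid → Spec_mark_by_frequency grid (mark_by_frequency grid)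

-- ===== LEMMAS AND PROOFS =====

-- row-major list of (value, (row, col)) of the nonzero cells, as both scans meet them
def pvCells (grid : List (List Int)) (cols : Nat) : List (Int × (Int × Int)) :=
  (List.range grid.length).flatMap (fun r =>
    ((List.range cols).filter (fun c => decide ((grid.getD r []).getD c 0 ≠ 0))).map
      (fun c => ((grid.getD r []).getD c 0, (((r : Nat) : Int), ((c : Nat) : Int)))))

-- a fold over a flatMap is a fold of folds
theorem pv_foldl_flatMap {α β γ : Type} (l : List α) (g : α → List β) (f : γ → β → γ) (init : γ) :
    (l.flatMap g).foldl f init = l.foldl (fun acc x => (g x).foldl f acc) init := by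
  induction l generalizing init with
  | nil => rfl
  | cons x xs ih => simp [List.foldl_append, ih]

-- A's counting double loop is Counter of the cell values
theorem pv_counts_cells (grid : List (List Int)) (cols : Nat) :
    pvCountsA grid grid.length cols
    = PySem.Dict.counter ((pvCells grid cols).map (fun x => x.1)) := by
  rw [← PySem.Dict.foldl_insert_getD_add_one_eq_counter, List.foldl_map]
  unfold pvCountsA pvCells
  rw [pv_foldl_flatMap]
  refine PySem.List.foldl_congr_mem _ _ _ _ ?_
  intro d r _
  rw [List.foldl_map,
    PySem.List.foldl_ite_eq_foldl_filter (fun c => (grid.getD r []).getD c 0 ≠ 0) _ _ _]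

-- B's double loop is the grouping fold over the same cells
theorem pv_positions_cells (grid : List (List Int)) (cols : Nat) :
    pvPositionsB grid grid.length cols
    = (pvCells grid cols).foldl (fun d x => d.modify x.1 [] (· ++ [x.2])) PySem.Dict.empty := by
  unfold pvPositionsB pvCells
  rw [pv_foldl_flatMap]
  refine PySem.List.foldl_congr_mem _ _ _ _ ?_
  intro d r _
  rw [List.foldl_map,
    PySem.List.foldl_ite_eq_foldl_filter (fun c => (grid.getD r []).getD c 0 ≠ 0) _ _ _]

-- the position list of any color c
theorem pv_positions_getD (grid : List (List Int)) (cols : Nat) (c : Int) :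
    (pvPositionsB grid grid.length cols).getD c []
    = ((pvCells grid cols).filter (fun x => x.1 == c)).map (fun x => x.2) := by
  rw [pv_positions_cells, PySem.Dict.getD_foldl_modify_append]
  simp [PySem.Dict.getD_empty]

-- the keys of positions are the distinct cell values in first-insertion order
theorem pv_positions_keys (grid : List (List Int)) (cols : Nat) :
    (pvPositionsB grid grid.length cols).keys
    = PySem.Set.ofList ((pvCells grid cols).map (fun x => x.1)) := by
  rw [pv_positions_cells,
    PySem.Dict.keys_foldl_modify_key (pvCells grid cols) (fun x => x.1) []
      (fun _ x => (· ++ [x.2])) PySem.Dict.empty,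
    PySem.Dict.keys_empty]
  rfl

-- Counter of a non-empty list is not the empty dict
theorem pv_counter_ne_empty (v : Int) (t : List Int) :
    PySem.Dict.counter (v :: t) ≠ PySem.Dict.empty := by
  intro h
  have hk := congrArg PySem.Dict.keys h
  rw [PySem.Dict.keys_counter] at hk
  simp [PySem.Set.ofList_cons] at hk

-- the winner's position list, split by rows (mf ≠ 0 folds the nonzero test away)
theorem pv_positions_mf (grid : List (List Int)) (cols : Nat) (mf : Int) (hmf : mf ≠ 0) :
    (pvPositionsB grid grid.length cols).getD mf []
    = (List.range grid.length).flatMap (fun r =>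
        ((List.range cols).filter (fun c => decide ((grid.getD r []).getD c 0 = mf))).map
          (fun c => ((((r : Nat) : Int), ((c : Nat) : Int)) : Int × Int))) := by
  rw [pv_positions_getD]
  unfold pvCells
  rw [List.filter_flatMap, List.map_flatMap]
  refine List.flatMap_congr ?_
  intro r _
  rw [List.filter_map, List.map_map, List.filter_filter,
    List.filter_congr (q := fun c => decide ((grid.getD r []).getD c 0 = mf)) (fun c _ => by
      dsimp only [Function.comp]
      generalize (grid.getD r []).getD c 0 = v
      by_cases h : v = mf
      · subst h; simp [hmf]
      · simp [h])]
  rfl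

-- B's targeted write over the winner's positions is A's marking double loop
theorem pv_markB_eq (grid : List (List Int)) (cols : Nat) (mf : Int) (hmf : mf ≠ 0) :
    ((pvPositionsB grid grid.length cols).getD mf []).foldl
      (fun out rc => out.set rc.1.toNat ((out.getD rc.1.toNat []).set rc.2.toNat 1))
      (pvZeroGrid grid.length cols)
    = pvMarkA grid mf grid.length cols := by
  rw [pv_positions_mf grid cols mf hmf, pv_foldl_flatMap]
  unfold pvMarkA
  refine PySem.List.foldl_congr_mem _ _ _ _ ?_
  intro out r _
  rw [List.foldl_map,
    PySem.List.foldl_ite_eq_foldl_filter (fun c => (grid.getD r []).getD c 0 = mf) _ _ _]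
  refine PySem.List.foldl_congr_mem _ _ _ _ ?_
  intro out' c _
  simp

-- ===== VERDICT (by name: the statement is the Claim_ definition above) =====
theorem mark_by_frequency_spec : Claim_equal_mark_by_frequency := by
  intro grid _ hpre
  show mark_by_frequency grid = mark_by_frequency_alt grid
  unfold mark_by_frequency mark_by_frequency_alt
  by_cases hguard : grid = [] ∨ grid.headD [] = []
  · rw [if_pos hguard, if_pos hguard]
  · rw [if_neg hguard, if_neg hguard]
    simp only []
    set cols := (grid.headD []).length with hcols
    set vals := (pvCells grid cols).map (fun x => x.1) with hvals
    have hcnt : pvCountsA grid grid.length cols = PySem.Dict.counter vals :=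
      pv_counts_cells grid cols
    rw [hcnt]
    by_cases hv : vals = []
    · have hcells : pvCells grid cols = [] := by
        have h' : (pvCells grid cols).map (fun x => x.1) = [] := by rw [← hvals]; exact hv
        simpa using h'
      have hpos : pvPositionsB grid grid.length cols = PySem.Dict.empty := by
        rw [pv_positions_cells, hcells]; rfl
      have hce : PySem.Dict.counter vals = PySem.Dict.empty := by rw [hv]; rfl
      rw [if_pos hce, if_pos hpos]
      rfl
    · obtain ⟨v, t, hvt⟩ : ∃ v t, vals = v :: t := by
        cases h : vals with
        | nil => exact absurd h hv
        | cons v t => exact ⟨v, t, rfl⟩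
      have hposne : pvPositionsB grid grid.length cols ≠ PySem.Dict.empty := by
        intro h
        have hk := congrArg PySem.Dict.keys h
        rw [pv_positions_keys, ← hvals, hvt, PySem.Dict.keys_empty] at hk
        simp [PySem.Set.ofList_cons] at hk
      rw [if_neg (by rw [hvt]; exact pv_counter_ne_empty v t), if_neg hposne]
      have hkeyfunA : (fun k => (PySem.Dict.counter vals).getD k 0)
          = fun k => ((vals.count k : Nat) : Int) := by
        funext k; exact PySem.Dict.getD_counter vals k
      have hkeyfunB : (fun c => (((pvPositionsB grid grid.length cols).getD c []).length : Int))
          = fun c => ((vals.count c : Nat) : Int) := by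
        funext c
        rw [pv_positions_getD, List.length_map, hvals, List.count_eq_countP, List.countP_map]
        congr 1
        exact List.countP_eq_length_filter.symm
      have hwin : pvWinnerB (pvPositionsB grid grid.length cols)
          = pvMostFrequentA (PySem.Dict.counter vals) := by
        unfold pvWinnerB pvMostFrequentA
        rw [PySem.Dict.keys_counter, pv_positions_keys, ← hvals, hkeyfunA, hkeyfunB]
      set mf := pvMostFrequentA (PySem.Dict.counter vals) with hmfdef
      have hmf : mf ≠ 0 := by
        obtain ⟨m, hm⟩ : ∃ m, PySem.List.max? (PySem.Set.ofList vals)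
            (fun k => ((vals.count k : Nat) : Int)) = some m := by
          cases h : PySem.List.max? (PySem.Set.ofList vals) (fun k => ((vals.count k : Nat) : Int)) with
          | none =>
            have := (PySem.List.max?_eq_none_iff _ _).mp h
            rw [hvt] at this
            simp [PySem.Set.ofList_cons] at this
          | some m => exact ⟨m, rfl⟩
        have hmeq : mf = m := by
          rw [hmfdef]
          unfold pvMostFrequentA
          rw [PySem.Dict.keys_counter, hkeyfunA, hm]
          rfl
        have hmv : m ∈ vals := (PySem.Set.mem_ofList vals m).mp (PySem.List.max?_mem hm)
        rw [hvals] at hmv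
        obtain ⟨x, hx, hxm⟩ := List.mem_map.mp hmv
        obtain ⟨r, _, hxr⟩ := List.mem_flatMap.mp hx
        obtain ⟨c, hc, hcx⟩ := List.mem_map.mp hxr
        have hcz := (List.mem_filter.mp hc).2
        rw [hmeq, ← hxm, ← hcx]
        simpa using hcz
      rw [hwin, ← pv_markB_eq grid cols mf hmf]
      rfl
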